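-- pv_equiv track=rewrite | github.com/Some-Yes-Man/PicoPi | tinycodeartist/morse.py | translate_to_text
-- ===== SOURCE A (Python) =====
-- dit = 500
--
-- read_intervall = int(dit/10)
--
-- between_symbol = 1*dit
--
-- between_letters = 3*dit
--
-- MorseCodes_rev = {
--     'sl': 'a',
--     'lsss': 'b',
--     'lsls': 'c',
--     'lss': 'd',
--     's': 'e',
--     'ssls': 'f',
--     'lls': 'g',
--     'ssss': 'h',
--     'ss': 'i',
--     'slll': 'j',
--     'lsl': 'k',
--     'slss': 'l',
--     'll': 'm',
--     'ls': 'n',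
--     'lll': 'o',
--     'slls': 'p',
--     'llsl': 'q',
--     'sls': 'r',
--     'sss': 's',
--     'l': 't',
--     'ssl': 'u',
--     'sssl': 'v',
--     'sll': 'w',
--     'lssl': 'x',
--     'lsll': 'y',
--     'llss': 'z',
--     'sllll': '0',
--     'sslll': '1',
--     'sssll': '2',
--     'ssssl': '3',
--     'sssss': '4',
--     'lssss': '5',
--     'llsss': '6',
--     'lllss': '7',
--     'lllls': '8',
--     'lllll': '9'
-- }
--
-- def count_following(data, start):
--     count = 0
--     for i in range(start, len(data)):
--         if data[i] == data[start]:
--             count = count + 1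
--         else:
--             break
--     return count
--
-- def translate_to_morse(data):
--     res = ""
--     index = 0
--     while (index < len(data)):
--         count = count_following(data, index)
--         if data[index] == 1:
--             if count > between_letters/read_intervall:
--                 res = res + " - "
--             elif count > between_symbol/read_intervall:
--                 res = res + " "
--         else:
--             if count > dit/read_intervall:
--                 res = res + "l"
--             else:
--                 res = res + "s"
--         index = index + count
--     return res
--
-- def translate_to_text(data):
--     data = translate_to_morse(data)
--     res = ""
--     for x in data.split():
--         if x == "-":
--             res = res + " "
--         elif x in MorseCodes_rev:
--             res = res + MorseCodes_rev[x]
--         else: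
--             res = res + "-"
--     return res
-- ===== SOURCE B (Python) =====
-- from itertools import groupby
--
-- dit = 500
-- read_intervall = int(dit/10)
-- between_symbol = 1*dit
-- between_letters = 3*dit
--
-- MorseCodes_rev = {
--     'sl': 'a', 'lsss': 'b', 'lsls': 'c', 'lss': 'd', 's': 'e', 'ssls': 'f',
--     'lls': 'g', 'ssss': 'h', 'ss': 'i', 'slll': 'j', 'lsl': 'k', 'slss': 'l',
--     'll': 'm', 'ls': 'n', 'lll': 'o', 'slls': 'p', 'llsl': 'q', 'sls': 'r',
--     'sss': 's', 'l': 't', 'ssl': 'u', 'sssl': 'v', 'sll': 'w', 'lssl': 'x',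
--     'lsll': 'y', 'llss': 'z', 'sllll': '0', 'sslll': '1', 'sssll': '2',
--     'ssssl': '3', 'sssss': '4', 'lssss': '5', 'llsss': '6', 'lllss': '7',
--     'lllls': '8', 'lllll': '9'
-- }
--
--
-- def translate_to_text(data):
--     # One pass: run-length groups are decoded directly into text, letter by
--     # letter, with no intermediate morse string and no split().
--     out = []
--     buf = []
--
--     def flush():
--         if buf:
--             out.append(MorseCodes_rev.get(''.join(buf), '-'))
--             buf.clear()
--
--     for value, group in groupby(data):
--         run = sum(1 for _ in group)
--         if value == 1:
--             if run > between_letters / read_intervall: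
--                 flush()
--                 out.append(' ')
--             elif run > between_symbol / read_intervall:
--                 flush()
--         else:
--             buf.append('l' if run > dit / read_intervall else 's')
--     flush()
--     return ''.join(out)
-- ===== Notes on version B (the rewrite author's own statement) =====
-- stated objective: simpler
-- what changed: Replaces the two-stage pipeline (index/count_following scan building a morse string, then split() and re-parse) with a single pass over run-length groups that decodes each letter directly into the output, so no intermediate morse string or split ever exists.
import Mathlib
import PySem

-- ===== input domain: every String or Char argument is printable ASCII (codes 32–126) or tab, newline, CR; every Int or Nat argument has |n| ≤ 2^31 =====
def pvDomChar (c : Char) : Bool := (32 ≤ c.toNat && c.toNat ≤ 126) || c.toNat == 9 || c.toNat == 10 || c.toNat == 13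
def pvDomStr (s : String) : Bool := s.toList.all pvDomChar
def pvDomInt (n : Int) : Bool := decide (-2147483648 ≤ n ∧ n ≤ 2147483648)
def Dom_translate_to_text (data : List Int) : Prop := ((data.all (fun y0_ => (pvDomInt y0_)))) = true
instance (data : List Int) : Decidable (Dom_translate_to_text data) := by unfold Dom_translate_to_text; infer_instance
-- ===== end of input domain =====

-- B replaces A's two-stage pipeline (build a morse string by an index/count_following
-- scan, then split() and re-parse it) with a single pass over run-length groups that
-- decodes directly into the output text; objective: simpler.
-- Python strings are ported as List Char (wrapped into String at the end);
-- Python's float thresholds between_letters/read_intervall = 30.0 etc. are exact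
-- integers, so the comparisons are ported as exact Int comparisons.

-- ===== PORT A =====
def pv_dit : Int := 500
def pv_read_intervall : Int := 500 / 10        -- int(dit/10) = 50, exact
def pv_between_symbol : Int := 1 * pv_dit
def pv_between_letters : Int := 3 * pv_dit

def MorseCodes_rev : PySem.Dict (List Char) (List Char) := PySem.Dict.ofList
  [ ("sl".toList, "a".toList), ("lsss".toList, "b".toList), ("lsls".toList, "c".toList),
    ("lss".toList, "d".toList), ("s".toList, "e".toList), ("ssls".toList, "f".toList),
    ("lls".toList, "g".toList), ("ssss".toList, "h".toList), ("ss".toList, "i".toList),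
    ("slll".toList, "j".toList), ("lsl".toList, "k".toList), ("slss".toList, "l".toList),
    ("ll".toList, "m".toList), ("ls".toList, "n".toList), ("lll".toList, "o".toList),
    ("slls".toList, "p".toList), ("llsl".toList, "q".toList), ("sls".toList, "r".toList),
    ("sss".toList, "s".toList), ("l".toList, "t".toList), ("ssl".toList, "u".toList),
    ("sssl".toList, "v".toList), ("sll".toList, "w".toList), ("lssl".toList, "x".toList),
    ("lsll".toList, "y".toList), ("llss".toList, "z".toList), ("sllll".toList, "0".toList),
    ("sslll".toList, "1".toList), ("sssll".toList, "2".toList), ("ssssl".toList, "3".toList),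
    ("sssss".toList, "4".toList), ("lssss".toList, "5".toList), ("llsss".toList, "6".toList),
    ("lllss".toList, "7".toList), ("lllls".toList, "8".toList), ("lllll".toList, "9".toList) ]

-- the 'for i in range(start, len(data)): … else: break' loop of count_following
def count_following_go (data : List Int) (v : Int) (i : Nat) : Nat :=
  if h : i < data.length then
    if data[i] == v then count_following_go data v (i + 1) + 1 else 0
  else 0
termination_by data.length - i

def count_following (data : List Int) (start : Nat) : Nat :=
  if h : start < data.length then count_following_go data data[start] start else 0
  -- A only calls this with start < len(data); the else-branch is unreachable there

-- needed for termination of the while-loop below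
theorem count_following_pos (data : List Int) (i : Nat) (h : i < data.length) :
    1 ≤ count_following data i := by
  unfold count_following
  rw [dif_pos h]
  unfold count_following_go
  rw [dif_pos h]
  simp

-- the 'while (index < len(data))' loop of translate_to_morse
def ttm_go (data : List Int) (index : Nat) (res : List Char) : List Char :=
  if h : index < data.length then
    let count := count_following data index
    let res' :=
      if data[index] == (1 : Int) then
        if (count : Int) > pv_between_letters / pv_read_intervall then res ++ [' ', '-', ' ']
        else if (count : Int) > pv_between_symbol / pv_read_intervall then res ++ [' ']
        else res
      else
        if (count : Int) > pv_dit / pv_read_intervall then res ++ ['l'] else res ++ ['s']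
    ttm_go data (index + count) res'
  else res
termination_by data.length - index
decreasing_by
  have := count_following_pos data index h
  omega

def translate_to_morse (data : List Int) : List Char := ttm_go data 0 []

def translate_to_text (data : List Int) : String :=
  let morse := translate_to_morse data
  -- 'x in MorseCodes_rev' then 'MorseCodes_rev[x]' is the get? pattern
  String.ofList ((PySem.Chars.split₀ morse).foldl
    (fun res x =>
      if x == ['-'] then res ++ [' ']
      else match MorseCodes_rev.get? x with
        | some v => res ++ v
        | none => res ++ ['-']) [])

-- ===== PORT B =====
-- itertools.groupby(data): the list of (value, run-length) groups
def pyRuns (l : List Int) : List (Int × Nat) :=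
  match l with
  | [] => []
  | x :: xs => (x, 1 + (xs.takeWhile (· == x)).length) :: pyRuns (xs.dropWhile (· == x))
termination_by l.length
decreasing_by
  have := List.length_dropWhile_le (· == x) xs
  simp only [List.length_cons]
  omega

-- flush(): append the decoded pending letter (MorseCodes_rev.get(buf, '-'))
def pvFlush (out buf : List Char) : List Char :=
  if buf == [] then out
  else match MorseCodes_rev.get? buf with
    | some v => out ++ v
    | none => out ++ ['-']

-- the 'for value, group in groupby(data)' loop, state (out, buf)
def bloop : List (Int × Nat) → List Char → List Char → List Char
  | [], out, buf => pvFlush out buf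
  | (v, n) :: rs, out, buf =>
    if v == 1 then
      if (n : Int) > pv_between_letters / pv_read_intervall then bloop rs (pvFlush out buf ++ [' ']) []
      else if (n : Int) > pv_between_symbol / pv_read_intervall then bloop rs (pvFlush out buf) []
      else bloop rs out buf
    else bloop rs out (buf ++ [if (n : Int) > pv_dit / pv_read_intervall then 'l' else 's'])

def translate_to_text_alt (data : List Int) : String :=
  String.ofList (bloop (pyRuns data) [] [])

-- ===== PRECONDITION & SPEC =====
def Spec_translate_to_text (data : List Int) (out : String) : Prop := out = translate_to_text_alt data
instance (data : List Int) (out : String) : Decidable (Spec_translate_to_text data out) := by unfold Spec_translate_to_text; infer_instance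

-- ===== CLAIM (what is proved, stated in full; the proofs are below) =====
def Claim_equal_translate_to_text : Prop := ∀ (data : List Int), Dom_translate_to_text data → Spec_translate_to_text data (translate_to_text data)

-- ===== LEMMAS AND PROOFS =====

-- the morse fragment A appends for one run (value v, length n)
def morsePiece (v : Int) (n : Nat) : List Char :=
  if v == 1 then
    if (n : Int) > pv_between_letters / pv_read_intervall then [' ', '-', ' ']
    else if (n : Int) > pv_between_symbol / pv_read_intervall then [' ']
    else []
  else if (n : Int) > pv_dit / pv_read_intervall then ['l'] else ['s']

def morseOf : List (Int × Nat) → List Char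
  | [] => []
  | (v, n) :: rs => morsePiece v n ++ morseOf rs


theorem count_following_go_eq (data : List Int) (v : Int) (i : Nat) :
    count_following_go data v i = ((data.drop i).takeWhile (· == v)).length := by
  induction hk : data.length - i using Nat.strong_induction_on generalizing i with
  | _ k ih =>
  unfold count_following_go
  by_cases h : i < data.length
  · rw [dif_pos h, List.drop_eq_getElem_cons h, List.takeWhile_cons]
    by_cases hv : data[i] == v
    · rw [if_pos hv, if_pos hv]
      simp only [List.length_cons]
      rw [ih (data.length - (i + 1)) (by omega) (i + 1) rfl]
    · rw [if_neg hv, if_neg hv]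
      simp
  · rw [dif_neg h, List.drop_eq_nil_of_le (by omega)]
    simp

theorem count_following_eq (data : List Int) (i : Nat) (h : i < data.length) :
    count_following data i
      = 1 + ((data.drop (i + 1)).takeWhile (· == data[i])).length := by
  unfold count_following
  rw [dif_pos h, count_following_go_eq, List.drop_eq_getElem_cons h, List.takeWhile_cons]
  simp only [BEq.rfl, if_pos]
  simp [Nat.add_comm]

theorem ttm_go_eq (data : List Int) (index : Nat) (res : List Char) :
    ttm_go data index res = res ++ morseOf (pyRuns (data.drop index)) := by
  induction hk : data.length - index using Nat.strong_induction_on generalizing index res with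
  | _ k ih =>
  unfold ttm_go
  by_cases h : index < data.length
  · rw [dif_pos h]
    show ttm_go data (index + count_following data index)
        (if data[index] == (1 : Int) then
          if ((count_following data index : Int) > pv_between_letters / pv_read_intervall) then
            res ++ [' ', '-', ' ']
          else if ((count_following data index : Int) > pv_between_symbol / pv_read_intervall) then
            res ++ [' ']
          else res
        else if ((count_following data index : Int) > pv_dit / pv_read_intervall) then
          res ++ ['l']
        else res ++ ['s']) = _
    have hpos := count_following_pos data index h
    have hruns : pyRuns (data.drop index)
        = (data[index], count_following data index)
          :: pyRuns ((data.drop (index + 1)).dropWhile (· == data[index])) := by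
      rw [List.drop_eq_getElem_cons h]
      rw [pyRuns]
      rw [count_following_eq data index h]
    have haux : ∀ (p : Int → Bool) (t : List Int),
        t.drop ((t.takeWhile p).length) = t.dropWhile p := by
      intro p t
      induction t with
      | nil => rfl
      | cons a t iht =>
        by_cases hp : p a
        · rw [List.takeWhile_cons, if_pos hp, List.dropWhile_cons_of_pos hp]
          simpa using iht
        · rw [List.takeWhile_cons, if_neg hp, List.dropWhile_cons_of_neg hp]
          rfl
    have hdrop : data.drop (index + count_following data index)
        = (data.drop (index + 1)).dropWhile (· == data[index]) := by
      rw [count_following_eq data index h]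
      rw [show index + (1 + ((data.drop (index + 1)).takeWhile (· == data[index])).length)
            = (index + 1) + ((data.drop (index + 1)).takeWhile (· == data[index])).length from by omega]
      rw [← List.drop_drop, haux]
    rw [ih (data.length - (index + count_following data index)) (by omega)
        (index + count_following data index) _ rfl, hdrop, hruns]
    show _ = res ++ morseOf ((data[index], count_following data index)
        :: pyRuns ((data.drop (index + 1)).dropWhile (· == data[index])))
    rw [show morseOf ((data[index], count_following data index)
          :: pyRuns ((data.drop (index + 1)).dropWhile (· == data[index])))
        = morsePiece data[index] (count_following data index)
          ++ morseOf (pyRuns ((data.drop (index + 1)).dropWhile (· == data[index]))) from rfl]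
    rw [← List.append_assoc]
    congr 1
    unfold morsePiece
    by_cases hv : data[index] == (1 : Int) <;> simp only [hv, if_true, if_false, Bool.false_eq_true]
    · split_ifs <;> simp
    · split_ifs <;> simp
  · rw [dif_neg h, List.drop_eq_nil_of_le (by omega)]
    rw [pyRuns]
    simp [morseOf]

theorem splitgo_acc (s : List Char) : ∀ (cur : List Char) (acc : List (List Char)),
    PySem.Chars.split₀.go s cur acc = acc.reverse ++ PySem.Chars.split₀.go s cur [] := by
  induction s with
  | nil =>
    intro cur acc
    simp only [PySem.Chars.split₀.go]
    by_cases hc : cur.isEmpty <;> simp [hc]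
  | cons c rest ih =>
    intro cur acc
    simp only [PySem.Chars.split₀.go]
    by_cases hs : PySem.Chars.isspace c <;> simp only [hs, if_true, if_false, Bool.false_eq_true]
    · by_cases hc : cur.isEmpty <;> simp only [hc, if_true, if_false, Bool.false_eq_true]
      · rw [ih [] acc]
      · rw [ih [] (cur.reverse :: acc), ih [] [cur.reverse]]
        simp
    · rw [ih (c :: cur) acc]

def decodeTok (x : List Char) : List Char :=
  if x == ['-'] then [' ']
  else match MorseCodes_rev.get? x with | some v => v | none => ['-']

def decodeAll (ts : List (List Char)) (res : List Char) : List Char :=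
  ts.foldl (fun r x => r ++ decodeTok x) res

theorem decodeAll_cons (t : List Char) (ts : List (List Char)) (res : List Char) :
    decodeAll (t :: ts) res = decodeAll ts (res ++ decodeTok t) := rfl

theorem flush_eq (res cur : List Char) (hcur : ∀ c ∈ cur, c = 's' ∨ c = 'l')
    (hne : cur ≠ []) : res ++ decodeTok cur.reverse = pvFlush res cur.reverse := by
  have hnd : cur.reverse ≠ ['-'] := by
    intro hcon
    have : '-' ∈ cur := by
      rw [← List.mem_reverse, hcon]; simp
    rcases hcur '-' this with h | h <;> simp at h
  have hne' : cur.reverse ≠ [] := by simp [hne]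
  unfold decodeTok pvFlush
  rw [if_neg (by simpa using hnd), if_neg (by simpa using hne')]
  cases MorseCodes_rev.get? cur.reverse <;> rfl

theorem flush_nil (res : List Char) : pvFlush res [] = res := rfl

theorem main_lemma (rs : List (Int × Nat)) :
    ∀ cur res : List Char, (∀ c ∈ cur, c = 's' ∨ c = 'l') →
      decodeAll (PySem.Chars.split₀.go (morseOf rs) cur []) res = bloop rs res cur.reverse := by
  induction rs with
  | nil =>
    intro cur res hcur
    show decodeAll (PySem.Chars.split₀.go [] cur []) res = bloop [] res cur.reverse
    simp only [PySem.Chars.split₀.go]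
    by_cases hc : cur = []
    · subst hc; simp [decodeAll, bloop, pvFlush]
    · rw [if_neg (by simpa using hc)]
      show decodeAll [cur.reverse] res = pvFlush res cur.reverse
      rw [decodeAll_cons]
      show res ++ decodeTok cur.reverse = _
      exact flush_eq res cur hcur hc
  | cons p rs ih =>
    obtain ⟨v, n⟩ := p
    intro cur res hcur
    have hsp : PySem.Chars.isspace ' ' = true := by decide
    have hdash : PySem.Chars.isspace '-' = false := by decide
    have hl : PySem.Chars.isspace 'l' = false := by decide
    have hss : PySem.Chars.isspace 's' = false := by decide
    show decodeAll (PySem.Chars.split₀.go (morsePiece v n ++ morseOf rs) cur []) res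
        = bloop ((v, n) :: rs) res cur.reverse
    unfold morsePiece bloop
    by_cases hv : v == (1 : Int) <;> simp only [hv, if_true, if_false, Bool.false_eq_true]
    · by_cases h30 : (n : Int) > pv_between_letters / pv_read_intervall
      · rw [if_pos h30, if_pos h30]
        simp only [List.cons_append, List.nil_append, PySem.Chars.split₀.go,
          hsp, hdash, if_true, if_false, Bool.false_eq_true]
        simp only [List.isEmpty_cons, List.reverse_singleton, List.reverse_nil,
          List.nil_append, Bool.false_eq_true, ite_false]
        by_cases hc : cur = []
        · subst hc
          simp only [List.isEmpty_nil, if_true, List.reverse_nil]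
          rw [splitgo_acc _ [] [['-']]]
          show decodeAll (['-'] :: PySem.Chars.split₀.go (morseOf rs) [] []) res
              = bloop rs (pvFlush res [] ++ [' ']) []
          rw [decodeAll_cons]
          rw [show (decodeTok ['-']) = [' '] from rfl]
          rw [ih [] (res ++ [' ']) (by simp)]
          rw [flush_nil]
          rfl
        · rw [if_neg (by simpa using hc)]
          rw [splitgo_acc _ [] [['-'], cur.reverse]]
          show decodeAll (cur.reverse :: ['-'] :: PySem.Chars.split₀.go (morseOf rs) [] []) res
              = bloop rs (pvFlush res cur.reverse ++ [' ']) []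
          rw [decodeAll_cons, decodeAll_cons]
          rw [show (decodeTok ['-']) = [' '] from rfl]
          rw [flush_eq res cur hcur hc]
          rw [ih [] (pvFlush res cur.reverse ++ [' ']) (by simp)]
          rfl
      · rw [if_neg h30, if_neg h30]
        by_cases h10 : (n : Int) > pv_between_symbol / pv_read_intervall
        · rw [if_pos h10, if_pos h10]
          simp only [List.cons_append, List.nil_append, PySem.Chars.split₀.go,
            hsp, if_true]
          by_cases hc : cur = []
          · subst hc
            simp only [List.isEmpty_nil, if_true, List.reverse_nil]
            rw [ih [] res (by simp)]
            rfl
          · rw [if_neg (by simpa using hc)]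
            rw [splitgo_acc _ [] [cur.reverse]]
            rw [show ([cur.reverse] : List (List Char)).reverse = [cur.reverse] from rfl]
            rw [show ([cur.reverse] ++ PySem.Chars.split₀.go (morseOf rs) [] [])
                = cur.reverse :: PySem.Chars.split₀.go (morseOf rs) [] [] from rfl]
            rw [decodeAll_cons, flush_eq res cur hcur hc]
            rw [ih [] (pvFlush res cur.reverse) (by simp)]
            rfl
        · rw [if_neg h10, if_neg h10]
          simp only [List.nil_append]
          exact ih cur res hcur
    · by_cases hd : (n : Int) > pv_dit / pv_read_intervall
      · rw [if_pos hd, if_pos hd]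
        simp only [List.cons_append, List.nil_append, PySem.Chars.split₀.go,
          hl, if_false, Bool.false_eq_true]
        rw [ih ('l' :: cur) res (by
          intro c hcmem
          rcases List.mem_cons.mp hcmem with h | h
          · right; exact h
          · exact hcur c h)]
        simp
      · rw [if_neg hd, if_neg hd]
        simp only [List.cons_append, List.nil_append, PySem.Chars.split₀.go,
          hss, if_false, Bool.false_eq_true]
        rw [ih ('s' :: cur) res (by
          intro c hcmem
          rcases List.mem_cons.mp hcmem with h | h
          · left; exact h
          · exact hcur c h)]
        simp

-- ===== VERDICT (by name: the statement is the Claim_ definition above) =====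
theorem translate_to_text_spec : Claim_equal_translate_to_text := by
  intro data _
  unfold Spec_translate_to_text translate_to_text translate_to_text_alt translate_to_morse
  rw [ttm_go_eq]
  simp only [List.drop_zero, List.nil_append]
  have h := main_lemma (pyRuns data) [] [] (by simp)
  simp only [List.reverse_nil] at h
  rw [show PySem.Chars.split₀ (morseOf (pyRuns data)) = PySem.Chars.split₀.go (morseOf (pyRuns data)) [] [] from rfl]
  rw [show ∀ ts res0, (List.foldl (fun res x =>
      if x == ['-'] then res ++ [' ']
      else match MorseCodes_rev.get? x with
        | some v => res ++ v
        | none => res ++ ['-']) res0 ts) = decodeAll ts res0 from ?_, h]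
  intro ts res0
  unfold decodeAll
  congr 1
  funext r x
  unfold decodeTok
  by_cases hx : x == ['-']
  · simp [hx]
  · simp [hx]
    cases MorseCodes_rev.get? x <;> simp
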